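-- pv_equiv track=rewrite | github.com/zkily/arai_emaps | backend/app/modules/database/api.py | _compute_inventory_updates
-- ===== SOURCE A (Python) =====
-- from typing import Optional
--
-- INVENTORY_PROCESS_CONFIG = [
--     {"key": "cutting", "keywords": ["切断"], "fields": {"carry": "cutting_carry_over", "actual": "cutting_actual", "defect": "cutting_defect", "scrap": "cutting_scrap", "onHold": "cutting_on_hold", "inventory": "cutting_inventory", "trend": "cutting_trend"}},
--     {"key": "chamfering", "keywords": ["面取"], "fields": {"carry": "chamfering_carry_over", "actual": "chamfering_actual", "defect": "chamfering_defect", "scrap": "chamfering_scrap", "onHold": "chamfering_on_hold", "inventory": "chamfering_inventory", "trend": "chamfering_trend"}},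
--     {"key": "molding", "keywords": ["成型"], "fields": {"carry": "molding_carry_over", "actual": "molding_actual", "defect": "molding_defect", "scrap": "molding_scrap", "onHold": "molding_on_hold", "inventory": "molding_inventory", "trend": "molding_trend"}},
--     {"key": "plating", "keywords": ["メッキ"], "fields": {"carry": "plating_carry_over", "actual": "plating_actual", "defect": "plating_defect", "scrap": "plating_scrap", "onHold": "plating_on_hold", "inventory": "plating_inventory", "trend": "plating_trend"}},
--     {"key": "welding", "keywords": ["溶接"], "fields": {"carry": "welding_carry_over", "actual": "welding_actual", "defect": "welding_defect", "scrap": "welding_scrap", "onHold": "welding_on_hold", "inventory": "welding_inventory", "trend": "welding_trend"}},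
--     {"key": "inspection", "keywords": ["検査"], "fields": {"carry": "inspection_carry_over", "actual": "inspection_actual", "defect": "inspection_defect", "scrap": "inspection_scrap", "onHold": "inspection_on_hold", "inventory": "inspection_inventory", "trend": "inspection_trend"}},
--     {"key": "warehouse", "keywords": ["倉庫"], "fields": {"carry": "warehouse_carry_over", "actual": "warehouse_actual", "scrap": "warehouse_scrap", "onHold": "warehouse_on_hold", "inventory": "warehouse_inventory", "trend": "warehouse_trend"}},
--     {"key": "outsourced_warehouse", "keywords": ["外注倉庫", "外注倉"], "fields": {"carry": "outsourced_warehouse_carry_over", "actual": "outsourced_warehouse_actual", "scrap": "outsourced_warehouse_scrap", "onHold": "outsourced_warehouse_on_hold", "inventory": "outsourced_warehouse_inventory", "trend": "outsourced_warehouse_trend"}},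
--     {"key": "outsourced_plating", "keywords": ["外注メッキ"], "fields": {"carry": "outsourced_plating_carry_over", "actual": "outsourced_plating_actual", "defect": "outsourced_plating_defect", "scrap": "outsourced_plating_scrap", "onHold": "outsourced_plating_on_hold", "inventory": "outsourced_plating_inventory", "trend": "outsourced_plating_trend"}},
--     {"key": "outsourced_welding", "keywords": ["外注溶接"], "fields": {"carry": "outsourced_welding_carry_over", "actual": "outsourced_welding_actual", "defect": "outsourced_welding_defect", "scrap": "outsourced_welding_scrap", "onHold": "outsourced_welding_on_hold", "inventory": "outsourced_welding_inventory", "trend": "outsourced_welding_trend"}},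
--     {"key": "pre_welding_inspection", "keywords": ["溶接前検査"], "fields": {"carry": "pre_welding_inspection_carry_over", "actual": "pre_welding_inspection_actual", "defect": "pre_welding_inspection_defect", "scrap": "pre_welding_inspection_scrap", "onHold": "pre_welding_inspection_on_hold", "inventory": "pre_welding_inspection_inventory", "trend": "pre_welding_inspection_trend"}},
--     {"key": "pre_inspection", "keywords": ["外注支給前"], "fields": {"carry": "pre_inspection_carry_over", "actual": "pre_inspection_actual", "scrap": "pre_inspection_scrap", "inventory": "pre_inspection_inventory", "trend": "pre_inspection_trend"}},
--     {"key": "pre_outsourcing", "keywords": ["外注検査前"], "fields": {"carry": "pre_outsourcing_carry_over", "actual": "pre_outsourcing_actual", "scrap": "pre_outsourcing_scrap", "inventory": "pre_outsourcing_inventory", "trend": "pre_outsourcing_trend"}},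
-- ]
--
-- def _get_process_config_by_key(key: str) -> Optional[dict]:
--     """INVENTORY_PROCESS_CONFIG から key で設定を取得"""
--     for c in INVENTORY_PROCESS_CONFIG:
--         if c["key"] == key:
--             return c
--     return None
--
-- def _num(row: dict, key: str) -> int:
--     if key not in row or row[key] is None:
--         return 0
--     try:
--         return int(row[key])
--     except (TypeError, ValueError):
--         return 0
--
-- def _compute_inventory_updates(
--     row: dict, sequence: list, previous_inventories: dict, is_start_date: bool
-- ) -> dict:
--     """一般工程在庫 = 繰越 + 実績 - 不良 - 廃棄 - 保留 - 下一工程実績 + 前日当工程在庫（負数許容）。外注倉庫は別計算のためスキップ。"""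
--     updates = {}
--     for i, key in enumerate(sequence):
--         config = _get_process_config_by_key(key)
--         if not config or config["key"] == "outsourced_warehouse":
--             continue
--         fields = config.get("fields", {})
--         inv_field = fields.get("inventory")
--         if not inv_field:
--             continue
--         carry = _num(row, fields.get("carry", ""))
--         actual = _num(row, fields.get("actual", ""))
--         defect = _num(row, fields.get("defect", "")) if fields.get("defect") else 0
--         scrap = _num(row, fields.get("scrap", "")) if fields.get("scrap") else 0
--         on_hold = _num(row, fields.get("onHold", "")) if fields.get("onHold") else 0
--         next_actual = 0
--         for j in range(i + 1, len(sequence)):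
--             next_config = _get_process_config_by_key(sequence[j])
--             if next_config:
--                 if next_config["key"] == "outsourced_warehouse":
--                     next_actual = _num(row, "outsourced_warehouse_actual")
--                     break
--                 if next_config.get("fields", {}).get("actual"):
--                     next_actual = _num(row, next_config["fields"]["actual"])
--                     break
--         prev_inv = 0 if is_start_date else previous_inventories.get(key, 0)
--         inv = carry + actual - defect - scrap - on_hold - next_actual + prev_inv
--         updates[inv_field] = inv
--     return updates
-- ===== SOURCE B (Python) =====
-- # B: the fixed process config is flattened once into a compact per-key table
-- # (inventory field or None, plus-fields, minus-fields, advance-field); a single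
-- # reverse pass precomputes each position's "next actual", the main pass builds
-- # (field, value) pairs, and a final fold turns them into the dict.
-- _TABLE = {
--     "cutting": ("cutting_inventory", ["cutting_carry_over", "cutting_actual"], ["cutting_defect", "cutting_scrap", "cutting_on_hold"], "cutting_actual"),
--     "chamfering": ("chamfering_inventory", ["chamfering_carry_over", "chamfering_actual"], ["chamfering_defect", "chamfering_scrap", "chamfering_on_hold"], "chamfering_actual"),
--     "molding": ("molding_inventory", ["molding_carry_over", "molding_actual"], ["molding_defect", "molding_scrap", "molding_on_hold"], "molding_actual"),
--     "plating": ("plating_inventory", ["plating_carry_over", "plating_actual"], ["plating_defect", "plating_scrap", "plating_on_hold"], "plating_actual"),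
--     "welding": ("welding_inventory", ["welding_carry_over", "welding_actual"], ["welding_defect", "welding_scrap", "welding_on_hold"], "welding_actual"),
--     "inspection": ("inspection_inventory", ["inspection_carry_over", "inspection_actual"], ["inspection_defect", "inspection_scrap", "inspection_on_hold"], "inspection_actual"),
--     "warehouse": ("warehouse_inventory", ["warehouse_carry_over", "warehouse_actual"], ["warehouse_scrap", "warehouse_on_hold"], "warehouse_actual"),
--     "outsourced_warehouse": (None, [], [], "outsourced_warehouse_actual"),
--     "outsourced_plating": ("outsourced_plating_inventory", ["outsourced_plating_carry_over", "outsourced_plating_actual"], ["outsourced_plating_defect", "outsourced_plating_scrap", "outsourced_plating_on_hold"], "outsourced_plating_actual"),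
--     "outsourced_welding": ("outsourced_welding_inventory", ["outsourced_welding_carry_over", "outsourced_welding_actual"], ["outsourced_welding_defect", "outsourced_welding_scrap", "outsourced_welding_on_hold"], "outsourced_welding_actual"),
--     "pre_welding_inspection": ("pre_welding_inspection_inventory", ["pre_welding_inspection_carry_over", "pre_welding_inspection_actual"], ["pre_welding_inspection_defect", "pre_welding_inspection_scrap", "pre_welding_inspection_on_hold"], "pre_welding_inspection_actual"),
--     "pre_inspection": ("pre_inspection_inventory", ["pre_inspection_carry_over", "pre_inspection_actual"], ["pre_inspection_scrap"], "pre_inspection_actual"),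
--     "pre_outsourcing": ("pre_outsourcing_inventory", ["pre_outsourcing_carry_over", "pre_outsourcing_actual"], ["pre_outsourcing_scrap"], "pre_outsourcing_actual"),
-- }
--
--
-- def _num(row: dict, key: str) -> int:
--     if key not in row or row[key] is None:
--         return 0
--     try:
--         return int(row[key])
--     except (TypeError, ValueError):
--         return 0
--
--
-- def _compute_inventory_updates(row, sequence, previous_inventories, is_start_date):
--     # reverse pass: for each position, the "next actual" found after it
--     nexts = []
--     tracked = 0
--     for key in reversed(sequence):
--         nexts.append(tracked)
--         entry = _TABLE.get(key)
--         if entry is not None: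
--             tracked = _num(row, entry[3])
--     nexts.reverse()
--
--     # forward pass: build the (inventory_field, value) pairs
--     pairs = []
--     for key, nxt in zip(sequence, nexts):
--         entry = _TABLE.get(key)
--         if entry is None or entry[0] is None:
--             continue
--         inv_field, plus, minus, _ = entry
--         val = sum(_num(row, f) for f in plus) - sum(_num(row, f) for f in minus) - nxt
--         if not is_start_date:
--             val += previous_inventories.get(key, 0)
--         pairs.append((inv_field, val))
--
--     updates = {}
--     for f, v in pairs:
--         updates[f] = v
--     return updates
-- ===== Notes on version B (the rewrite author's own statement) =====
-- stated objective: faster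
-- what changed: Flattens the fixed process config into a per-key table (inventory/plus/minus/advance fields), replaces the quadratic inner next-actual scan with one reverse suffix pass, and builds the result in staged passes (suffix array, pair list, final dict fold) instead of A's single interleaved loop with an inner rescan.
import Mathlib
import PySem

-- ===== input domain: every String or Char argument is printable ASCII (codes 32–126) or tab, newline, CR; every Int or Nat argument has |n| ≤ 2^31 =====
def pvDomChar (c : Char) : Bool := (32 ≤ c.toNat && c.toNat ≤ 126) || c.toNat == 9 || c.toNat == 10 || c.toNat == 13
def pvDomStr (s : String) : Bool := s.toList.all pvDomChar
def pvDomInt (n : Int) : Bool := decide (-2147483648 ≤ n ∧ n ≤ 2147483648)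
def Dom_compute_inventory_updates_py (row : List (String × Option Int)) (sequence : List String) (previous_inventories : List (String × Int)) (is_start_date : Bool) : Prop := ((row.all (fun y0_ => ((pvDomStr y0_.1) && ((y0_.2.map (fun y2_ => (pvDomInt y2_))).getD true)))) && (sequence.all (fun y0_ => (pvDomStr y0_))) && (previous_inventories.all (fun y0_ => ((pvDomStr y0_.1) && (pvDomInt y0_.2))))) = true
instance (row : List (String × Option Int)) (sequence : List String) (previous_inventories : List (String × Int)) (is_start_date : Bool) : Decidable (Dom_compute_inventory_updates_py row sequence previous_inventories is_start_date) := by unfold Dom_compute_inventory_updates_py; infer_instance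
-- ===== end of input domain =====

-- B flattens the fixed config into a per-key table, replaces A's quadratic
-- inner next-actual scan with one reverse suffix pass, and builds the result
-- in staged passes (objective: faster).

-- _num(row, key) — shared helper (identical in Source A and Source B)
def pvNum (row : List (String × Option Int)) (key : String) : Int :=
  match PySem.Dict.get? (PySem.Dict.mk row) key with
  | some (some v) => v
  | _ => 0

-- ===== PORT A =====
-- module-level INVENTORY_PROCESS_CONFIG as (key, fields) pairs (keywords unused)
def pvConfig : List (String × PySem.Dict String String) := [
  ("cutting", PySem.Dict.mk [("carry", "cutting_carry_over"), ("actual", "cutting_actual"), ("defect", "cutting_defect"), ("scrap", "cutting_scrap"), ("onHold", "cutting_on_hold"), ("inventory", "cutting_inventory"), ("trend", "cutting_trend")]),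
  ("chamfering", PySem.Dict.mk [("carry", "chamfering_carry_over"), ("actual", "chamfering_actual"), ("defect", "chamfering_defect"), ("scrap", "chamfering_scrap"), ("onHold", "chamfering_on_hold"), ("inventory", "chamfering_inventory"), ("trend", "chamfering_trend")]),
  ("molding", PySem.Dict.mk [("carry", "molding_carry_over"), ("actual", "molding_actual"), ("defect", "molding_defect"), ("scrap", "molding_scrap"), ("onHold", "molding_on_hold"), ("inventory", "molding_inventory"), ("trend", "molding_trend")]),
  ("plating", PySem.Dict.mk [("carry", "plating_carry_over"), ("actual", "plating_actual"), ("defect", "plating_defect"), ("scrap", "plating_scrap"), ("onHold", "plating_on_hold"), ("inventory", "plating_inventory"), ("trend", "plating_trend")]),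
  ("welding", PySem.Dict.mk [("carry", "welding_carry_over"), ("actual", "welding_actual"), ("defect", "welding_defect"), ("scrap", "welding_scrap"), ("onHold", "welding_on_hold"), ("inventory", "welding_inventory"), ("trend", "welding_trend")]),
  ("inspection", PySem.Dict.mk [("carry", "inspection_carry_over"), ("actual", "inspection_actual"), ("defect", "inspection_defect"), ("scrap", "inspection_scrap"), ("onHold", "inspection_on_hold"), ("inventory", "inspection_inventory"), ("trend", "inspection_trend")]),
  ("warehouse", PySem.Dict.mk [("carry", "warehouse_carry_over"), ("actual", "warehouse_actual"), ("scrap", "warehouse_scrap"), ("onHold", "warehouse_on_hold"), ("inventory", "warehouse_inventory"), ("trend", "warehouse_trend")]),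
  ("outsourced_warehouse", PySem.Dict.mk [("carry", "outsourced_warehouse_carry_over"), ("actual", "outsourced_warehouse_actual"), ("scrap", "outsourced_warehouse_scrap"), ("onHold", "outsourced_warehouse_on_hold"), ("inventory", "outsourced_warehouse_inventory"), ("trend", "outsourced_warehouse_trend")]),
  ("outsourced_plating", PySem.Dict.mk [("carry", "outsourced_plating_carry_over"), ("actual", "outsourced_plating_actual"), ("defect", "outsourced_plating_defect"), ("scrap", "outsourced_plating_scrap"), ("onHold", "outsourced_plating_on_hold"), ("inventory", "outsourced_plating_inventory"), ("trend", "outsourced_plating_trend")]),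
  ("outsourced_welding", PySem.Dict.mk [("carry", "outsourced_welding_carry_over"), ("actual", "outsourced_welding_actual"), ("defect", "outsourced_welding_defect"), ("scrap", "outsourced_welding_scrap"), ("onHold", "outsourced_welding_on_hold"), ("inventory", "outsourced_welding_inventory"), ("trend", "outsourced_welding_trend")]),
  ("pre_welding_inspection", PySem.Dict.mk [("carry", "pre_welding_inspection_carry_over"), ("actual", "pre_welding_inspection_actual"), ("defect", "pre_welding_inspection_defect"), ("scrap", "pre_welding_inspection_scrap"), ("onHold", "pre_welding_inspection_on_hold"), ("inventory", "pre_welding_inspection_inventory"), ("trend", "pre_welding_inspection_trend")]),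
  ("pre_inspection", PySem.Dict.mk [("carry", "pre_inspection_carry_over"), ("actual", "pre_inspection_actual"), ("scrap", "pre_inspection_scrap"), ("inventory", "pre_inspection_inventory"), ("trend", "pre_inspection_trend")]),
  ("pre_outsourcing", PySem.Dict.mk [("carry", "pre_outsourcing_carry_over"), ("actual", "pre_outsourcing_actual"), ("scrap", "pre_outsourcing_scrap"), ("inventory", "pre_outsourcing_inventory"), ("trend", "pre_outsourcing_trend")])
]

-- _get_process_config_by_key: linear scan of the config list
def pvFindCfg (key : String) : List (String × PySem.Dict String String) → Option (String × PySem.Dict String String)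
  | [] => none
  | c :: rest => if c.1 == key then some c else pvFindCfg key rest

-- the inner 'for j in range(i+1, len(sequence))' scan, on the suffix after i
def pvNextActualA (row : List (String × Option Int)) : List String → Int
  | [] => 0
  | k :: rest =>
    match pvFindCfg k pvConfig with
    | none => pvNextActualA row rest
    | some (ck, fields) =>
      if ck == "outsourced_warehouse" then pvNum row "outsourced_warehouse_actual"
      else match PySem.Dict.get? fields "actual" with
        | some a => if a != "" then pvNum row a else pvNextActualA row rest
        | none => pvNextActualA row rest

-- the main 'for i, key in enumerate(sequence)' loop; rest is the suffix after key
def pvLoopA (row : List (String × Option Int)) (prev : PySem.Dict String Int) (st : Bool) :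
    List String → PySem.Dict String Int → PySem.Dict String Int
  | [], u => u
  | key :: rest, u =>
    pvLoopA row prev st rest <|
      match pvFindCfg key pvConfig with
      | none => u
      | some (ck, fields) =>
        if ck == "outsourced_warehouse" then u
        else match PySem.Dict.get? fields "inventory" with
          | none => u
          | some invf =>
            if invf == "" then u
            else
              let carry := pvNum row (PySem.Dict.getD fields "carry" "")
              let actual := pvNum row (PySem.Dict.getD fields "actual" "")
              let defect := match PySem.Dict.get? fields "defect" with
                | some d => if d != "" then pvNum row d else 0
                | none => 0
              let scrap := match PySem.Dict.get? fields "scrap" with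
                | some d => if d != "" then pvNum row d else 0
                | none => 0
              let onHold := match PySem.Dict.get? fields "onHold" with
                | some d => if d != "" then pvNum row d else 0
                | none => 0
              let nextActual := pvNextActualA row rest
              let prevInv : Int := if st then 0 else PySem.Dict.getD prev key 0
              u.insert invf (carry + actual - defect - scrap - onHold - nextActual + prevInv)

def compute_inventory_updates_py (row : List (String × Option Int)) (sequence : List String) (previous_inventories : List (String × Int)) (is_start_date : Bool) : List (String × Int) :=
  (pvLoopA row (PySem.Dict.mk previous_inventories) is_start_date sequence PySem.Dict.empty).items

-- ===== PORT B =====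
-- _TABLE: key ↦ (inventory field or none, plus fields, minus fields, advance field)
def pvTable : List (String × (Option String × List String × List String × String)) := [
  ("cutting", (some "cutting_inventory", ["cutting_carry_over", "cutting_actual"], ["cutting_defect", "cutting_scrap", "cutting_on_hold"], "cutting_actual")),
  ("chamfering", (some "chamfering_inventory", ["chamfering_carry_over", "chamfering_actual"], ["chamfering_defect", "chamfering_scrap", "chamfering_on_hold"], "chamfering_actual")),
  ("molding", (some "molding_inventory", ["molding_carry_over", "molding_actual"], ["molding_defect", "molding_scrap", "molding_on_hold"], "molding_actual")),
  ("plating", (some "plating_inventory", ["plating_carry_over", "plating_actual"], ["plating_defect", "plating_scrap", "plating_on_hold"], "plating_actual")),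
  ("welding", (some "welding_inventory", ["welding_carry_over", "welding_actual"], ["welding_defect", "welding_scrap", "welding_on_hold"], "welding_actual")),
  ("inspection", (some "inspection_inventory", ["inspection_carry_over", "inspection_actual"], ["inspection_defect", "inspection_scrap", "inspection_on_hold"], "inspection_actual")),
  ("warehouse", (some "warehouse_inventory", ["warehouse_carry_over", "warehouse_actual"], ["warehouse_scrap", "warehouse_on_hold"], "warehouse_actual")),
  ("outsourced_warehouse", (none, [], [], "outsourced_warehouse_actual")),
  ("outsourced_plating", (some "outsourced_plating_inventory", ["outsourced_plating_carry_over", "outsourced_plating_actual"], ["outsourced_plating_defect", "outsourced_plating_scrap", "outsourced_plating_on_hold"], "outsourced_plating_actual")),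
  ("outsourced_welding", (some "outsourced_welding_inventory", ["outsourced_welding_carry_over", "outsourced_welding_actual"], ["outsourced_welding_defect", "outsourced_welding_scrap", "outsourced_welding_on_hold"], "outsourced_welding_actual")),
  ("pre_welding_inspection", (some "pre_welding_inspection_inventory", ["pre_welding_inspection_carry_over", "pre_welding_inspection_actual"], ["pre_welding_inspection_defect", "pre_welding_inspection_scrap", "pre_welding_inspection_on_hold"], "pre_welding_inspection_actual")),
  ("pre_inspection", (some "pre_inspection_inventory", ["pre_inspection_carry_over", "pre_inspection_actual"], ["pre_inspection_scrap"], "pre_inspection_actual")),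
  ("pre_outsourcing", (some "pre_outsourcing_inventory", ["pre_outsourcing_carry_over", "pre_outsourcing_actual"], ["pre_outsourcing_scrap"], "pre_outsourcing_actual"))
]

-- _TABLE.get(key) (dict with unique literal keys; first match)
def pvGetT (key : String) : List (String × (Option String × List String × List String × String)) → Option (Option String × List String × List String × String)
  | [] => none
  | e :: rest => if key == e.1 then some e.2 else pvGetT key rest

-- one step of the reverse pass: record tracked, then advance it on a known key
def pvStepB (row : List (String × Option Int)) (st : List Int × Int) (key : String) : List Int × Int :=
  (st.2 :: st.1,
   match pvGetT key pvTable with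
   | none => st.2
   | some e => pvNum row e.2.2.2)
-- Python appends then reverses the whole list at the end; consing while folding
-- builds exactly that reversed list, so no final reverse is needed here.

-- the body of the forward pass, as an Option-producing map over (key, next)
def pvPairFn (row : List (String × Option Int)) (prev : PySem.Dict String Int) (st : Bool)
    (p : String × Int) : Option (String × Int) :=
  match pvGetT p.1 pvTable with
  | none => none
  | some (invOpt, plus, minus, _) =>
    match invOpt with
    | none => none
    | some invf =>
      let v0 := plus.foldl (fun t f => t + pvNum row f) 0
                - minus.foldl (fun t f => t + pvNum row f) 0 - p.2
      let v := if st then v0 else v0 + PySem.Dict.getD prev p.1 0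
      some (invf, v)

def compute_inventory_updates_py_alt (row : List (String × Option Int)) (sequence : List String) (previous_inventories : List (String × Int)) (is_start_date : Bool) : List (String × Int) :=
  let nexts := (sequence.reverse.foldl (pvStepB row) ([], 0)).1
  let pairs := (sequence.zip nexts).filterMap
    (pvPairFn row (PySem.Dict.mk previous_inventories) is_start_date)
  (pairs.foldl (fun u p => u.insert p.1 p.2) PySem.Dict.empty).items

-- ===== PRECONDITION & SPEC =====
def Spec_compute_inventory_updates_py (row : List (String × Option Int)) (sequence : List String) (previous_inventories : List (String × Int)) (is_start_date : Bool) (out : List (String × Int)) : Prop := out = compute_inventory_updates_py_alt row sequence previous_inventories is_start_date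
instance (row : List (String × Option Int)) (sequence : List String) (previous_inventories : List (String × Int)) (is_start_date : Bool) (out : List (String × Int)) : Decidable (Spec_compute_inventory_updates_py row sequence previous_inventories is_start_date out) := by unfold Spec_compute_inventory_updates_py; infer_instance

-- ===== CLAIM (what is proved, stated in full; the proofs are below) =====
def Claim_equal_compute_inventory_updates_py : Prop := ∀ (row : List (String × Option Int)) (sequence : List String) (previous_inventories : List (String × Int)) (is_start_date : Bool), Dom_compute_inventory_updates_py row sequence previous_inventories is_start_date → Spec_compute_inventory_updates_py row sequence previous_inventories is_start_date (compute_inventory_updates_py row sequence previous_inventories is_start_date)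

-- ===== LEMMAS AND PROOFS =====

-- per-key: the reverse-pass advance equals A's inner-scan head behaviour
set_option maxHeartbeats 1000000 in
theorem stepB_eq (row : List (String × Option Int)) (k : String) (acc : List Int) (t : Int) :
    pvStepB row (acc, t) k =
      (t :: acc,
       match pvFindCfg k pvConfig with
       | none => t
       | some (ck, fields) =>
         if ck == "outsourced_warehouse" then pvNum row "outsourced_warehouse_actual"
         else match PySem.Dict.get? fields "actual" with
           | some a => if a != "" then pvNum row a else t
           | none => t) := by
  by_cases h1 : k = "cutting"; · subst h1; rfl
  by_cases h2 : k = "chamfering"; · subst h2; rfl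
  by_cases h3 : k = "molding"; · subst h3; rfl
  by_cases h4 : k = "plating"; · subst h4; rfl
  by_cases h5 : k = "welding"; · subst h5; rfl
  by_cases h6 : k = "inspection"; · subst h6; rfl
  by_cases h7 : k = "warehouse"; · subst h7; rfl
  by_cases h8 : k = "outsourced_warehouse"; · subst h8; rfl
  by_cases h9 : k = "outsourced_plating"; · subst h9; rfl
  by_cases h10 : k = "outsourced_welding"; · subst h10; rfl
  by_cases h11 : k = "pre_welding_inspection"; · subst h11; rfl
  by_cases h12 : k = "pre_inspection"; · subst h12; rfl
  by_cases h13 : k = "pre_outsourcing"; · subst h13; rfl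
  simp [pvStepB, pvGetT, pvTable, pvFindCfg, pvConfig, beq_iff_eq,
        h1, h2, h3, h4, h5, h6, h7, h8, h9, h10, h11, h12, h13,
        Ne.symm h1, Ne.symm h2, Ne.symm h3, Ne.symm h4, Ne.symm h5, Ne.symm h6,
        Ne.symm h7, Ne.symm h8, Ne.symm h9, Ne.symm h10, Ne.symm h11, Ne.symm h12, Ne.symm h13]

-- the second component of the reverse pass is A's inner scan of the whole list
theorem revpass_snd (row : List (String × Option Int)) (l : List String) :
    (l.reverse.foldl (pvStepB row) ([], 0)).2 = pvNextActualA row l := by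
  induction l with
  | nil => rfl
  | cons k rest ih =>
    have hsplit : ∀ (s : List Int × Int), s = (s.1, s.2) := fun s => rfl
    rw [List.reverse_cons, List.foldl_append, List.foldl_cons, List.foldl_nil,
        hsplit (rest.reverse.foldl (pvStepB row) ([], 0)), stepB_eq, ih,
        pvNextActualA]

-- the first component prepends the suffix's inner-scan value
theorem revpass_fst (row : List (String × Option Int)) (k : String) (rest : List String) :
    ((k :: rest).reverse.foldl (pvStepB row) ([], 0)).1 =
      pvNextActualA row rest :: (rest.reverse.foldl (pvStepB row) ([], 0)).1 := by
  have hsplit : ∀ (s : List Int × Int), s = (s.1, s.2) := fun s => rfl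
  rw [List.reverse_cons, List.foldl_append, List.foldl_cons, List.foldl_nil,
      hsplit (rest.reverse.foldl (pvStepB row) ([], 0)), stepB_eq, revpass_snd]

-- folding inserts over a filterMap = folding the optional insert directly
theorem foldl_insert_filterMap (g : String × Int → Option (String × Int))
    (l : List (String × Int)) (u : PySem.Dict String Int) :
    ((l.filterMap g).foldl (fun u p => u.insert p.1 p.2) u) =
      l.foldl (fun u x => match g x with | none => u | some p => u.insert p.1 p.2) u := by
  induction l generalizing u with
  | nil => rfl
  | cons x xs ih =>
    rw [List.filterMap_cons]
    cases hg : g x with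
    | none => simp only [List.foldl_cons, hg, ih]
    | some p => simp only [List.foldl_cons, hg, ih]

-- per-key: A's loop body equals the optional insert of B's pair function
set_option maxHeartbeats 1000000 in
theorem body_eq (row : List (String × Option Int)) (prev : PySem.Dict String Int) (st : Bool)
    (k : String) (nxt : Int) (u : PySem.Dict String Int) :
    (match pvFindCfg k pvConfig with
      | none => u
      | some (ck, fields) =>
        if ck == "outsourced_warehouse" then u
        else match PySem.Dict.get? fields "inventory" with
          | none => u
          | some invf =>
            if invf == "" then u
            else
              let carry := pvNum row (PySem.Dict.getD fields "carry" "")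
              let actual := pvNum row (PySem.Dict.getD fields "actual" "")
              let defect := match PySem.Dict.get? fields "defect" with
                | some d => if d != "" then pvNum row d else 0
                | none => 0
              let scrap := match PySem.Dict.get? fields "scrap" with
                | some d => if d != "" then pvNum row d else 0
                | none => 0
              let onHold := match PySem.Dict.get? fields "onHold" with
                | some d => if d != "" then pvNum row d else 0
                | none => 0
              let prevInv : Int := if st then 0 else PySem.Dict.getD prev k 0
              u.insert invf (carry + actual - defect - scrap - onHold - nxt + prevInv)) =
    (match pvPairFn row prev st (k, nxt) with
      | none => u
      | some p => u.insert p.1 p.2) := by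
  by_cases h1 : k = "cutting"
  · subst h1; simp only [pvPairFn, pvFindCfg, pvConfig, pvGetT, pvTable]; simp only [PySem.Dict.get?, PySem.Dict.getD, List.foldl, List.find?, Option.map, Option.getD, String.reduceBEq, String.reduceEq, bne, Bool.not_true, Bool.not_false, reduceCtorEq, reduceIte, Option.some.injEq, ne_eq]; refine congrArg (u.insert _) ?_; split_ifs <;> ring
  by_cases h2 : k = "chamfering"
  · subst h2; simp only [pvPairFn, pvFindCfg, pvConfig, pvGetT, pvTable]; simp only [PySem.Dict.get?, PySem.Dict.getD, List.foldl, List.find?, Option.map, Option.getD, String.reduceBEq, String.reduceEq, bne, Bool.not_true, Bool.not_false, reduceCtorEq, reduceIte, Option.some.injEq, ne_eq]; refine congrArg (u.insert _) ?_; split_ifs <;> ring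
  by_cases h3 : k = "molding"
  · subst h3; simp only [pvPairFn, pvFindCfg, pvConfig, pvGetT, pvTable]; simp only [PySem.Dict.get?, PySem.Dict.getD, List.foldl, List.find?, Option.map, Option.getD, String.reduceBEq, String.reduceEq, bne, Bool.not_true, Bool.not_false, reduceCtorEq, reduceIte, Option.some.injEq, ne_eq]; refine congrArg (u.insert _) ?_; split_ifs <;> ring
  by_cases h4 : k = "plating"
  · subst h4; simp only [pvPairFn, pvFindCfg, pvConfig, pvGetT, pvTable]; simp only [PySem.Dict.get?, PySem.Dict.getD, List.foldl, List.find?, Option.map, Option.getD, String.reduceBEq, String.reduceEq, bne, Bool.not_true, Bool.not_false, reduceCtorEq, reduceIte, Option.some.injEq, ne_eq]; refine congrArg (u.insert _) ?_; split_ifs <;> ring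
  by_cases h5 : k = "welding"
  · subst h5; simp only [pvPairFn, pvFindCfg, pvConfig, pvGetT, pvTable]; simp only [PySem.Dict.get?, PySem.Dict.getD, List.foldl, List.find?, Option.map, Option.getD, String.reduceBEq, String.reduceEq, bne, Bool.not_true, Bool.not_false, reduceCtorEq, reduceIte, Option.some.injEq, ne_eq]; refine congrArg (u.insert _) ?_; split_ifs <;> ring
  by_cases h6 : k = "inspection"
  · subst h6; simp only [pvPairFn, pvFindCfg, pvConfig, pvGetT, pvTable]; simp only [PySem.Dict.get?, PySem.Dict.getD, List.foldl, List.find?, Option.map, Option.getD, String.reduceBEq, String.reduceEq, bne, Bool.not_true, Bool.not_false, reduceCtorEq, reduceIte, Option.some.injEq, ne_eq]; refine congrArg (u.insert _) ?_; split_ifs <;> ring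
  by_cases h7 : k = "warehouse"
  · subst h7; simp only [pvPairFn, pvFindCfg, pvConfig, pvGetT, pvTable]; simp only [PySem.Dict.get?, PySem.Dict.getD, List.foldl, List.find?, Option.map, Option.getD, String.reduceBEq, String.reduceEq, bne, Bool.not_true, Bool.not_false, reduceCtorEq, reduceIte, Option.some.injEq, ne_eq]; refine congrArg (u.insert _) ?_; split_ifs <;> ring
  by_cases h8 : k = "outsourced_warehouse"
  · subst h8; rfl
  by_cases h9 : k = "outsourced_plating"
  · subst h9; simp only [pvPairFn, pvFindCfg, pvConfig, pvGetT, pvTable]; simp only [PySem.Dict.get?, PySem.Dict.getD, List.foldl, List.find?, Option.map, Option.getD, String.reduceBEq, String.reduceEq, bne, Bool.not_true, Bool.not_false, reduceCtorEq, reduceIte, Option.some.injEq, ne_eq]; refine congrArg (u.insert _) ?_; split_ifs <;> ring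
  by_cases h10 : k = "outsourced_welding"
  · subst h10; simp only [pvPairFn, pvFindCfg, pvConfig, pvGetT, pvTable]; simp only [PySem.Dict.get?, PySem.Dict.getD, List.foldl, List.find?, Option.map, Option.getD, String.reduceBEq, String.reduceEq, bne, Bool.not_true, Bool.not_false, reduceCtorEq, reduceIte, Option.some.injEq, ne_eq]; refine congrArg (u.insert _) ?_; split_ifs <;> ring
  by_cases h11 : k = "pre_welding_inspection"
  · subst h11; simp only [pvPairFn, pvFindCfg, pvConfig, pvGetT, pvTable]; simp only [PySem.Dict.get?, PySem.Dict.getD, List.foldl, List.find?, Option.map, Option.getD, String.reduceBEq, String.reduceEq, bne, Bool.not_true, Bool.not_false, reduceCtorEq, reduceIte, Option.some.injEq, ne_eq]; refine congrArg (u.insert _) ?_; split_ifs <;> ring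
  by_cases h12 : k = "pre_inspection"
  · subst h12; simp only [pvPairFn, pvFindCfg, pvConfig, pvGetT, pvTable]; simp only [PySem.Dict.get?, PySem.Dict.getD, List.foldl, List.find?, Option.map, Option.getD, String.reduceBEq, String.reduceEq, bne, Bool.not_true, Bool.not_false, reduceCtorEq, reduceIte, Option.some.injEq, ne_eq]; refine congrArg (u.insert _) ?_; split_ifs <;> ring
  by_cases h13 : k = "pre_outsourcing"
  · subst h13; simp only [pvPairFn, pvFindCfg, pvConfig, pvGetT, pvTable]; simp only [PySem.Dict.get?, PySem.Dict.getD, List.foldl, List.find?, Option.map, Option.getD, String.reduceBEq, String.reduceEq, bne, Bool.not_true, Bool.not_false, reduceCtorEq, reduceIte, Option.some.injEq, ne_eq]; refine congrArg (u.insert _) ?_; split_ifs <;> ring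
  simp [pvPairFn, pvGetT, pvTable, pvFindCfg, pvConfig, beq_iff_eq,
        h1, h2, h3, h4, h5, h6, h7, h8, h9, h10, h11, h12, h13,
        Ne.symm h1, Ne.symm h2, Ne.symm h3, Ne.symm h4, Ne.symm h5, Ne.symm h6,
        Ne.symm h7, Ne.symm h8, Ne.symm h9, Ne.symm h10, Ne.symm h11, Ne.symm h12, Ne.symm h13]

-- A's loop over the sequence equals B's staged passes
theorem loopA_eq (row : List (String × Option Int)) (prev : PySem.Dict String Int) (st : Bool)
    (l : List String) (u : PySem.Dict String Int) :
    pvLoopA row prev st l u =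
      ((l.zip (l.reverse.foldl (pvStepB row) ([], 0)).1).filterMap
        (pvPairFn row prev st)).foldl (fun u p => u.insert p.1 p.2) u := by
  induction l generalizing u with
  | nil => rfl
  | cons k rest ih =>
    rw [foldl_insert_filterMap, revpass_fst, List.zip_cons_cons, List.foldl_cons,
        ← foldl_insert_filterMap, pvLoopA, ih, ← body_eq row prev st k (pvNextActualA row rest) u]

-- ===== VERDICT (by name: the statement is the Claim_ definition above) =====
theorem compute_inventory_updates_py_spec : Claim_equal_compute_inventory_updates_py := by
  intro row seq prev st _
  unfold Spec_compute_inventory_updates_py compute_inventory_updates_py compute_inventory_updates_py_alt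
  rw [loopA_eq]
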